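-- pv_equiv track=rewrite | github.com/vandemjh/covid-19-grapher | utils.py | skipOver
-- ===== SOURCE A (Python) =====
-- def skipOver(dates, skipSize):
--     toReturn = []
--     for date in list(dates):
--         if list(dates).index(date) % skipSize == 0:
--             toReturn.append(date[5 : len(date)])
--         else:
--             toReturn.append("")
--     return toReturn
-- ===== SOURCE B (Python) =====
-- def skipOver(dates, skipSize):
--     return [date[5:] if i % skipSize == 0 else "" for i, date in enumerate(dates)]
-- ===== Notes on version B (the rewrite author's own statement) =====
-- stated objective: faster
-- what changed: Dropped the per-element list(dates).index scan entirely: B decides each label from its own position via a single enumerate comprehension.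
-- intended difference: On lists containing a duplicate date whose position and first-occurrence index disagree modulo skipSize (and the date is longer than 5 chars), A blanks or keeps the label according to the FIRST occurrence's index while B uses the label's own position, which is the intended every-skipSize-th thinning of axis labels. — e.g. on skipOver(["2020-01-01", "2020-01-01"], 2): A returns ["01-01", "01-01"], B returns ["01-01", ""]
import Mathlib
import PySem

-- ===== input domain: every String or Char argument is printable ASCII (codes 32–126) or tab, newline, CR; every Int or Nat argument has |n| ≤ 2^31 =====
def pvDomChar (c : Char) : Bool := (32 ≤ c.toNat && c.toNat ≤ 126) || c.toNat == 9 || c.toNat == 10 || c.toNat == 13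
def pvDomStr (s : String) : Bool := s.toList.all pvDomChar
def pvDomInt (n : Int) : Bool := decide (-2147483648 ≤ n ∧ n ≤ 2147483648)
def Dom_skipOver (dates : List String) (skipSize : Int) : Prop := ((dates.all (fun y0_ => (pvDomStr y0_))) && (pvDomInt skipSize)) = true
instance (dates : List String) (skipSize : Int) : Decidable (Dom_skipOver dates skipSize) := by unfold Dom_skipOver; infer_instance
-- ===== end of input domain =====

-- B drops A's per-element list(dates).index scan and blanks by the label's own position (objective: faster);
-- on duplicate labels A keys the decision on the first occurrence, B on the position (see D_ below).

-- ===== PORT A =====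
def skipOver (dates : List String) (skipSize : Int) : List String :=
  dates.foldl (fun toReturn date =>
    if PySem.Int.mod (Int.ofNat ((PySem.List.index? dates date).getD 0)) skipSize = 0 then
      toReturn ++ [PySem.Str.slice date (some 5) (some (PySem.Str.len date))]
    else
      toReturn ++ [""]) []

-- ===== PORT B =====
def skipOver_alt (dates : List String) (skipSize : Int) : List String :=
  (PySem.List.enumerate dates).map (fun p =>
    if PySem.Int.mod p.1 skipSize = 0 then PySem.Str.slice p.2 (some 5) none else "")

-- ===== PRECONDITION & SPEC =====
-- Pre_ excludes skipSize = 0 with nonempty dates, where Python A raises ZeroDivisionError (B raises there too).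
def Pre_skipOver (dates : List String) (skipSize : Int) : Prop := dates = [] ∨ skipSize ≠ 0
instance (dates : List String) (skipSize : Int) : Decidable (Pre_skipOver dates skipSize) := by unfold Pre_skipOver; infer_instance
def pvWitness_skipOver : List String × Int := (["2020-01-01", "2020-01-02", "2020-01-03"], 2)

-- On lists containing a duplicate date whose position and first-occurrence index disagree modulo
-- skipSize (and the date is longer than 5 chars), A blanks/keeps the label according to the FIRST
-- occurrence's index while B uses the label's own position, which is the intended every-skipSize-th
-- thinning of axis labels.
def D_skipOver (dates : List String) (skipSize : Int) : Prop :=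
  ∃ i : Nat, ∃ _ : i < dates.length, 5 < (dates[i]).toList.length ∧
    ¬ ((PySem.Int.mod (((dates.idxOf? dates[i]).getD 0 : Nat) : Int) skipSize = 0) ↔
       (PySem.Int.mod (i : Int) skipSize = 0))
instance (dates : List String) (skipSize : Int) : Decidable (D_skipOver dates skipSize) := by
  unfold D_skipOver; infer_instance

def Spec_skipOver (dates : List String) (skipSize : Int) (out : List String) : Prop :=
  ¬ D_skipOver dates skipSize → out = skipOver_alt dates skipSize
instance (dates : List String) (skipSize : Int) (out : List String) : Decidable (Spec_skipOver dates skipSize out) := by unfold Spec_skipOver; infer_instance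

def pvDiffWitness_skipOver : List String × Int := (["2020-01-01", "2020-01-01"], 2)
def pvDiffWitnessOut_skipOver : (List String) × (List String) := (["01-01", "01-01"], ["01-01", ""])

-- ===== CLAIM (what is proved, stated in full; the proofs are below) =====
def Claim_unchanged_skipOver : Prop := ∀ (dates : List String) (skipSize : Int), Dom_skipOver dates skipSize → Pre_skipOver dates skipSize → Spec_skipOver dates skipSize (skipOver dates skipSize)
def Claim_changed_skipOver : Prop := Dom_skipOver (pvDiffWitness_skipOver.1) (pvDiffWitness_skipOver.2) ∧ Pre_skipOver (pvDiffWitness_skipOver.1) (pvDiffWitness_skipOver.2) ∧ D_skipOver (pvDiffWitness_skipOver.1) (pvDiffWitness_skipOver.2) ∧ skipOver (pvDiffWitness_skipOver.1) (pvDiffWitness_skipOver.2) = pvDiffWitnessOut_skipOver.1 ∧ skipOver_alt (pvDiffWitness_skipOver.1) (pvDiffWitness_skipOver.2) = pvDiffWitnessOut_skipOver.2 ∧ pvDiffWitnessOut_skipOver.1 ≠ pvDiffWitnessOut_skipOver.2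
def Claim_exact_skipOver : Prop := ∀ (dates : List String) (skipSize : Int), Dom_skipOver dates skipSize → Pre_skipOver dates skipSize → D_skipOver dates skipSize → skipOver dates skipSize ≠ skipOver_alt dates skipSize

-- ===== LEMMAS AND PROOFS =====

-- A's accumulator loop is init ++ map.
theorem foldl_append_if_map {α β : Type} (l : List α) (acc : List β)
    (c : α → Prop) [DecidablePred c] (g : α → β) (e : β) :
    l.foldl (fun a x => if c x then a ++ [g x] else a ++ [e]) acc
      = acc ++ l.map (fun x => if c x then g x else e) := by
  induction l generalizing acc with
  | nil => simp
  | cons y t ih => by_cases h : c y <;> simp [h, ih]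

-- pointwise form of A
theorem skipOver_eq_map (dates : List String) (skipSize : Int) :
    skipOver dates skipSize = dates.map (fun date =>
      if PySem.Int.mod (Int.ofNat ((PySem.List.index? dates date).getD 0)) skipSize = 0 then
        PySem.Str.slice date (some 5) (some (PySem.Str.len date))
      else "") := by
  unfold skipOver
  rw [foldl_append_if_map dates []
    (fun date => PySem.Int.mod (Int.ofNat ((PySem.List.index? dates date).getD 0)) skipSize = 0)
    (fun date => PySem.Str.slice date (some 5) (some (PySem.Str.len date))) ""]
  simp

-- the two string tails agree: date[5:len(date)] = date[5:]
theorem slice_len_eq_slice_none (s : String) :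
    PySem.Str.slice s (some 5) (some (PySem.Str.len s)) = PySem.Str.slice s (some 5) none := by
  apply String.toList_inj.mp
  rw [PySem.Str.toList_slice, PySem.Str.toList_slice]
  simp only [PySem.Chars.slice_eq_listSlice, PySem.Str.len_eq]
  rw [PySem.List.slice_toNat s.toList (by norm_num) (by positivity),
    PySem.List.slice_from s.toList (by norm_num)]
  apply List.take_of_length_le
  simp

theorem toList_slice_from_five (s : String) :
    (PySem.Str.slice s (some 5) none).toList = s.toList.drop 5 := by
  rw [PySem.Str.toList_slice]
  simp only [PySem.Chars.slice_eq_listSlice]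
  exact PySem.List.slice_from s.toList (by norm_num)

-- a short date's tail is empty
theorem slice_from_five_short (s : String) (h : s.toList.length ≤ 5) :
    PySem.Str.slice s (some 5) none = "" := by
  apply String.toList_inj.mp
  rw [toList_slice_from_five]
  simp [List.drop_eq_nil_iff.mpr h]

theorem length_skipOver (dates : List String) (skipSize : Int) :
    (skipOver dates skipSize).length = dates.length := by
  rw [skipOver_eq_map]; simp

theorem length_skipOver_alt (dates : List String) (skipSize : Int) :
    (skipOver_alt dates skipSize).length = dates.length := by
  simp [skipOver_alt, PySem.List.length_enumerate]

-- B at index i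
theorem skipOver_alt_getElem (dates : List String) (skipSize : Int) (i : Nat)
    (h : i < dates.length) :
    (skipOver_alt dates skipSize)[i]'(by rw [length_skipOver_alt]; exact h) =
      if PySem.Int.mod (i : Int) skipSize = 0 then PySem.Str.slice (dates[i]) (some 5) none
      else "" := by
  unfold skipOver_alt
  rw [List.getElem_map]
  rw [PySem.List.getElem_enumerate]
  simp

-- A at index i, expressed through idxOf?
theorem skipOver_getElem (dates : List String) (skipSize : Int) (i : Nat)
    (h : i < dates.length) :
    (skipOver dates skipSize)[i]'(by rw [length_skipOver]; exact h) =
      if PySem.Int.mod (((dates.idxOf? dates[i]).getD 0 : Nat) : Int) skipSize = 0 then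
        PySem.Str.slice (dates[i]) (some 5) (some (PySem.Str.len dates[i]))
      else "" := by
  have := skipOver_eq_map dates skipSize
  rw [List.ext_getElem_iff] at this
  obtain ⟨hl, he⟩ := this
  rw [he i (by rw [length_skipOver]; exact h) (by simpa using h)]
  rw [List.getElem_map, PySem.List.index?_eq_idxOf?]
  norm_cast

-- ===== VERDICT (by name: the statement is the Claim_ definition above) =====
theorem skipOver_spec : Claim_unchanged_skipOver := by
  intro dates skipSize _ _ hnd
  apply List.ext_getElem (by rw [length_skipOver, length_skipOver_alt])
  intro i hi hi'
  rw [skipOver_getElem dates skipSize i (by rwa [length_skipOver] at hi),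
    skipOver_alt_getElem dates skipSize i (by rwa [length_skipOver_alt] at hi')]
  have hi0 : i < dates.length := by rwa [length_skipOver] at hi
  by_cases hlen : 5 < (dates[i]).toList.length
  · have hiff : (PySem.Int.mod (((dates.idxOf? dates[i]).getD 0 : Nat) : Int) skipSize = 0) ↔
        (PySem.Int.mod (i : Int) skipSize = 0) := by
      by_contra hc
      exact hnd ⟨i, hi0, hlen, hc⟩
    by_cases hm : PySem.Int.mod (i : Int) skipSize = 0
    · rw [if_pos (hiff.mpr hm), if_pos hm, slice_len_eq_slice_none]
    · rw [if_neg (fun hh => hm (hiff.mp hh)), if_neg hm]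
  · push Not at hlen
    have h1 : PySem.Str.slice (dates[i]) (some 5) none = "" := slice_from_five_short _ hlen
    have h2 : PySem.Str.slice (dates[i]) (some 5) (some (PySem.Str.len dates[i])) = "" := by
      rw [slice_len_eq_slice_none]; exact h1
    rw [h1, h2]
    split_ifs <;> rfl

theorem skipOver_changed : Claim_changed_skipOver := by
  unfold Claim_changed_skipOver; decide

theorem skipOver_tight : Claim_exact_skipOver := by
  intro dates skipSize _ _ hd heq
  obtain ⟨i, hi, hlen, hne⟩ := hd
  have hi' : i < (skipOver dates skipSize).length := by rwa [length_skipOver]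
  have hi'' : i < (skipOver_alt dates skipSize).length := by rwa [length_skipOver_alt]
  have hel : (skipOver dates skipSize)[i]'hi' = (skipOver_alt dates skipSize)[i]'hi'' := by
    simp [heq]
  rw [skipOver_getElem dates skipSize i hi, skipOver_alt_getElem dates skipSize i hi] at hel
  have hnil : (dates[i]).toList.drop 5 ≠ [] := by
    simp only [ne_eq, List.drop_eq_nil_iff]; omega
  have hslice : PySem.Str.slice (dates[i]) (some 5) none ≠ "" := by
    intro hh
    apply hnil
    rw [← toList_slice_from_five, hh]
    rfl
  by_cases hA : PySem.Int.mod (((dates.idxOf? dates[i]).getD 0 : Nat) : Int) skipSize = 0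
  · have hB : ¬ PySem.Int.mod (i : Int) skipSize = 0 := fun hh => hne ⟨fun _ => hh, fun _ => hA⟩
    rw [if_pos hA, if_neg hB, slice_len_eq_slice_none] at hel
    exact hslice hel
  · have hB : PySem.Int.mod (i : Int) skipSize = 0 := by
      by_contra hh; exact hne ⟨fun h1 => absurd h1 hA, fun h2 => absurd h2 hh⟩
    rw [if_neg hA, if_pos hB] at hel
    exact hslice hel.symm
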